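-- pv_equiv track=rewrite | github.com/Lucien97/word-order-negation | bible_file_processing.py | dic_compare
-- ===== SOURCE A (Python) =====
-- def dic_compare(s_dic, t_dic):
--     align_dic = {}
--     source_item_pop = []
--     target_item_pop = []
--     for item in t_dic:
--         if item not in s_dic:
--             target_item_pop.append(item)
--     for item in s_dic:
--         if item not in t_dic:
--             source_item_pop.append(item)
--     for item in target_item_pop:
--         t_dic.pop(item)
--     for item in source_item_pop:
--         s_dic.pop(item)
--     for item in t_dic:
--         align_dic[item] = [s_dic[item], t_dic[item]]
--     return align_dic
-- ===== SOURCE B (Python) =====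
-- def dic_compare(s_dic, t_dic):
--     # single pass: look each t-key up in s_dic directly; no common-key set, no pop lists
--     align = {}
--     for k, tv in t_dic.items():
--         sv = s_dic.get(k)
--         if sv is not None:
--             align[k] = [sv, tv]
--     # trim both argument dicts to the aligned keys by rebuilding them
--     for d in (s_dic, t_dic):
--         keep = {k: d[k] for k in align}
--         d.clear()
--         d.update(keep)
--     return align
-- ===== Notes on version B (the rewrite author's own statement) =====
-- stated objective: simpler
-- what changed: B builds the result in one forward pass over t_dic.items() with a direct s_dic.get lookup (no common-key computation, no pop lists, no rebuild from mutated dicts); the argument dicts are afterwards trimmed by clear+update rather than A's collect-then-pop loops (return value proved equal; the mutated s_dic's key order may differ).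
import Mathlib
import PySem

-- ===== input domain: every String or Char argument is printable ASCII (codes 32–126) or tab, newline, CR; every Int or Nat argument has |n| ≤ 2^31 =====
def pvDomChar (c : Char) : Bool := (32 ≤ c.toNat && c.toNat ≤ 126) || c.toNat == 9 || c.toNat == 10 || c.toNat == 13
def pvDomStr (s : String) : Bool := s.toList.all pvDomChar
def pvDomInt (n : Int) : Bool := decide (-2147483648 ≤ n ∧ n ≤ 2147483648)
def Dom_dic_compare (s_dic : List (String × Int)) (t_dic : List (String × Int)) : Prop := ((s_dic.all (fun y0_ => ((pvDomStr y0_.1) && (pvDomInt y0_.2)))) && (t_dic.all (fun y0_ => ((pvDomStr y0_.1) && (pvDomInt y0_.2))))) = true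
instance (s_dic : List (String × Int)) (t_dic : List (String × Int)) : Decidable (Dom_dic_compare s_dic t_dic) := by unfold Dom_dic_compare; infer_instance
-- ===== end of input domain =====

-- B builds the aligned pairs in ONE forward pass over t_dic's items with a direct s_dic.get
-- lookup, instead of A's staged collect-pop-rebuild; objective: simpler. Both Pythons mutate
-- the argument dicts down to the common keys; the equivalence proved here is about the RETURN
-- value only (B trims by clear+update, so the mutated s_dic's key order may differ from A's).

-- ===== PORT A =====
-- dicts become PySem.Dict built from the association lists; `t_dic.pop(item)` on a key known
-- to be present is exactly `Dict.erase`; in the final loop `s_dic[item]` / `t_dic[item]` are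
-- looked up on keys guaranteed present (the survivors of the pops), so `getD _ 0` is exact there.
def dic_compare (s_dic : List (String × Int)) (t_dic : List (String × Int)) : List (String × List Int) :=
  let s := PySem.Dict.ofList s_dic
  let t := PySem.Dict.ofList t_dic
  let target_item_pop : List String :=
    t.keys.foldl (fun acc item => if !s.contains item then acc ++ [item] else acc) []
  let source_item_pop : List String :=
    s.keys.foldl (fun acc item => if !t.contains item then acc ++ [item] else acc) []
  let t2 := target_item_pop.foldl PySem.Dict.erase t
  let s2 := source_item_pop.foldl PySem.Dict.erase s
  let align := t2.keys.foldl
    (fun a item => a.insert item [s2.getD item 0, t2.getD item 0])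
    (PySem.Dict.empty : PySem.Dict String (List Int))
  align.items

-- ===== PORT B =====
-- Source B's single loop over t_dic.items(): `s_dic.get(k)` is `Dict.get?` (values are ints, never
-- None, so `is not None` is exactly `isSome`, matched here). Source B's trim loops only mutate the
-- arguments (immutable here) and never touch the returned `align`, so they have no port.
def dic_compare_alt (s_dic : List (String × Int)) (t_dic : List (String × Int)) : List (String × List Int) :=
  let s := PySem.Dict.ofList s_dic
  let t := PySem.Dict.ofList t_dic
  let align := t.items.foldl
    (fun a p =>
      match s.get? p.1 with
      | some sv => a.insert p.1 [sv, p.2]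
      | none => a)
    (PySem.Dict.empty : PySem.Dict String (List Int))
  align.items

-- ===== PRECONDITION & SPEC =====
def Spec_dic_compare (s_dic : List (String × Int)) (t_dic : List (String × Int)) (out : List (String × List Int)) : Prop := out = dic_compare_alt s_dic t_dic
instance (s_dic : List (String × Int)) (t_dic : List (String × Int)) (out : List (String × List Int)) : Decidable (Spec_dic_compare s_dic t_dic out) := by unfold Spec_dic_compare; infer_instance

-- ===== CLAIM (what is proved, stated in full; the proofs are below) =====
def Claim_equal_dic_compare : Prop := ∀ (s_dic : List (String × Int)) (t_dic : List (String × Int)), Dom_dic_compare s_dic t_dic → Spec_dic_compare s_dic t_dic (dic_compare s_dic t_dic)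

-- ===== LEMMAS AND PROOFS =====

-- A's pop loops: erasing a list of keys filters the items list.
theorem items_foldl_erase (L : List String) (d : PySem.Dict String Int) :
    (L.foldl PySem.Dict.erase d).items = d.items.filter (fun p => !L.contains p.1) := by
  induction L generalizing d with
  | nil => simp
  | cons a L ih =>
    simp only [List.foldl_cons, ih, PySem.Dict.erase, List.filter_filter]
    apply List.filter_congr
    intro p _
    by_cases h : p.1 = a <;> by_cases h2 : p.1 ∈ L <;> simp [h, h2]

-- Looking up a key that survives the filter gives the original dict's value.
theorem getD_filter_of_pred (d : PySem.Dict String Int) (q : String → Bool) (k : String)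
    (hk : q k = true) :
    (PySem.Dict.mk (d.items.filter (fun p => q p.1))).getD k 0 = d.getD k 0 := by
  have hpred : (fun a : String × Int => decide ((q a.1 = true) ∧ (a.1 == k) = true))
      = fun a : String × Int => a.1 == k := by
    funext a; by_cases h : a.1 = k <;> simp [h, hk]
  simp only [PySem.Dict.getD, PySem.Dict.get?, List.find?_filter, hpred]

-- B's loop: a conditional-insert pass over pairs with fresh distinct keys appends the hits.
theorem items_foldl_insert_opt (S : PySem.Dict String Int) (l : List (String × Int))
    (d : PySem.Dict String (List Int))
    (hfresh : ∀ p ∈ l, d.contains p.1 = false) (hnd : (l.map (fun p => p.1)).Nodup) :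
    (l.foldl (fun a p =>
        match S.get? p.1 with
        | some sv => a.insert p.1 [sv, p.2]
        | none => a) d).items
      = d.items ++ (l.filter (fun p => S.contains p.1)).map
          (fun p => (p.1, [S.getD p.1 0, p.2])) := by
  induction l generalizing d with
  | nil => simp
  | cons p l ih =>
    simp only [List.map_cons, List.nodup_cons] at hnd
    cases hg : S.get? p.1 with
    | none =>
      have hc : S.contains p.1 = false := by
        rw [PySem.Dict.contains_eq_isSome_get?, hg]; rfl
      simp only [List.foldl_cons, hg, List.filter_cons, hc]
      exact ih d (fun q hq => hfresh q (List.mem_cons_of_mem _ hq)) hnd.2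
    | some sv =>
      have hc : S.contains p.1 = true := by
        rw [PySem.Dict.contains_eq_isSome_get?, hg]; rfl
      have hdc : d.contains p.1 = false := hfresh p (List.mem_cons_self ..)
      have hfresh' : ∀ q ∈ l, (d.insert p.1 [sv, p.2]).contains q.1 = false := by
        intro q hq
        rw [PySem.Dict.contains_insert]
        have hne : q.1 ≠ p.1 := fun h => hnd.1 (h ▸ List.mem_map_of_mem hq)
        simp [hne, hfresh q (List.mem_cons_of_mem _ hq)]
      simp only [List.foldl_cons, hg, List.filter_cons, hc, if_true,
        ih _ hfresh' hnd.2, PySem.Dict.items_insert_of_not_contains _ _ hdc,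
        PySem.Dict.getD_of_get?_eq_some S 0 hg, List.map_cons, List.append_assoc,
        List.singleton_append]

theorem dic_compare_eq_alt (s_dic t_dic : List (String × Int)) :
    dic_compare s_dic t_dic = dic_compare_alt s_dic t_dic := by
  unfold dic_compare dic_compare_alt
  simp only []
  set S := PySem.Dict.ofList s_dic with hS
  set T := PySem.Dict.ofList t_dic with hT
  have hTnd : T.keys.Nodup := PySem.Dict.nodup_keys_ofList t_dic
  -- the two append loops of A build filtered key lists
  have h1 : T.keys.foldl (fun acc item => if !S.contains item then acc ++ [item] else acc) []
      = T.keys.filter (fun k => !S.contains k) := by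
    simpa using PySem.List.foldl_append_if (fun k => !S.contains k) (fun k => k) T.keys []
  have h2 : S.keys.foldl (fun acc item => if !T.contains item then acc ++ [item] else acc) []
      = S.keys.filter (fun k => !T.contains k) := by
    simpa using PySem.List.foldl_append_if (fun k => !T.contains k) (fun k => k) S.keys []
  rw [h1, h2]
  -- A's pop loops keep exactly the entries whose key the other dict contains
  have ht2 : (T.keys.filter (fun k => !S.contains k)).foldl PySem.Dict.erase T
      = PySem.Dict.mk (T.items.filter (fun p => S.contains p.1)) := by
    apply PySem.Dict.ext
    rw [items_foldl_erase]
    apply List.filter_congr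
    intro p hp
    have hmem : p.1 ∈ T.keys := List.mem_map_of_mem hp
    by_cases hc : S.contains p.1 <;> simp [List.mem_filter, hmem, hc]
  have hs2 : (S.keys.filter (fun k => !T.contains k)).foldl PySem.Dict.erase S
      = PySem.Dict.mk (S.items.filter (fun p => T.contains p.1)) := by
    apply PySem.Dict.ext
    rw [items_foldl_erase]
    apply List.filter_congr
    intro p hp
    have hmem : p.1 ∈ S.keys := List.mem_map_of_mem hp
    by_cases hc : T.contains p.1 <;> simp [List.mem_filter, hmem, hc]
  rw [ht2, hs2]
  set tP := T.items.filter (fun p => S.contains p.1) with htP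
  set sP := S.items.filter (fun p => T.contains p.1) with hsP
  -- A's surviving keys are distinct, so its insert loop appends them in order
  have hnd : ((PySem.Dict.mk tP).keys.map (fun a => a)).Nodup := by
    simp only [List.map_id_fun', id]
    have : (PySem.Dict.mk tP).keys.Sublist T.keys := List.Sublist.map _ List.filter_sublist
    exact hTnd.sublist this
  rw [PySem.Dict.items_foldl_insert_fresh _ (fun a => a)
      (fun item => [(PySem.Dict.mk sP).getD item 0, (PySem.Dict.mk tP).getD item 0])
      _ (by intro a _; simp) hnd]
  -- B's single pass appends exactly the pairs of tP
  rw [items_foldl_insert_opt S T.items PySem.Dict.empty (by intro p _; simp) hTnd]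
  -- both sides are now maps over tP
  have hkeys : (PySem.Dict.mk tP).keys = tP.map (fun p => p.1) := rfl
  rw [hkeys, List.map_map]
  simp only [PySem.Dict.empty, List.nil_append, ← htP]
  apply List.map_congr_left
  intro p hp
  have hpT : p ∈ T.items ∧ S.contains p.1 = true := by
    have := List.mem_filter.mp (htP ▸ hp)
    exact ⟨this.1, this.2⟩
  have hTc : T.contains p.1 = true := by
    have : p.1 ∈ T.keys := List.mem_map_of_mem hpT.1
    exact (PySem.Dict.contains_iff_mem_keys T p.1).mpr this
  have hpT' : (p.1, p.2) ∈ T.items := by simpa using hpT.1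
  have hTval : T.getD p.1 0 = p.2 := PySem.Dict.getD_of_mem_items T hpT' hTnd 0
  simp only [Function.comp, htP, hsP,
    getD_filter_of_pred S _ _ hTc, getD_filter_of_pred T _ _ hpT.2, hTval]

-- ===== VERDICT (by name: the statement is the Claim_ definition above) =====
theorem dic_compare_spec : Claim_equal_dic_compare := by
  intro s_dic t_dic _
  exact dic_compare_eq_alt s_dic t_dic
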